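-- pv_equiv track=rewrite | github.com/chengchakkwong/POS-Data-Analytics-Pipeline | replenishment_service.py | guess_min_and_multiple
-- ===== SOURCE A (Python) =====
-- import math
-- from collections import Counter
-- from functools import reduce
-- import math
--
-- def guess_min_and_multiple(history_records):
--     """
--     根據歷史入貨紀錄，猜測供應商的 Min (起訂量) 與 Multiple (下單倍數)。
--
--     三步驟：先去雜訊（若有出現≥2 次的數，則嘗試排除「只出現 1 次」中移除後能讓剩餘 GCD 最大的雜訊），
--     再求 GCD 得 Multiple，最後在原始紀錄中找「能被 Multiple 整除」的最小值當 Min（排除樣品單）。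
--
--     :param history_records: list of int，例如 [24, 36, 25, 12, 2, 48]
--     :return: tuple (guessed_min, guessed_multiple)，無資料時 (None, None)
--     """
--     clean = [int(x) for x in history_records if x is not None and str(x).strip() != '']
--     try:
--         clean = [x for x in clean if x > 0]
--     except (TypeError, ValueError):
--         return None, None
--     if not clean:
--         return None, None
--     if len(clean) == 1:
--         return clean[0], clean[0]
--
--     # --- Step 1: 資料清洗（找出可靠的數字，必要時排除單次出現的雜訊）---
--     counts = Counter(clean)
--     has_frequent = any(cnt >= 2 for cnt in counts.values())
--     single_occurrence = [num for num, cnt in counts.items() if cnt == 1]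
--     if not single_occurrence or not has_frequent:
--         # 沒有單次出現的數，或沒有任何數出現≥2 次（如 [2,3,4]）：全部參與 GCD
--         reliable_nums = list(set(clean))
--     else:
--         # 有出現≥2 次的數時：嘗試排除某一個「只出現 1 次」的數，看誰能讓剩餘數字的 GCD 最大
--         best_gcd = 0
--         best_removal = None
--         for s in single_occurrence:
--             without_s = list(clean)
--             without_s.remove(s)
--             if without_s:
--                 g = reduce(math.gcd, without_s)
--                 if g > best_gcd:
--                     best_gcd = g
--                     best_removal = s
--         if best_removal is not None and best_gcd >= 1:
--             without_noise = [x for x in clean if x != best_removal]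
--             reliable_nums = list(set(without_noise))
--         else:
--             reliable_nums = list(set(clean))
--     reliable_nums.sort()
--
--     # --- Step 2: 推算 Multiple（求 GCD）---
--     guessed_multiple = reduce(math.gcd, reliable_nums)
--     if guessed_multiple <= 0:
--         guessed_multiple = 1
--
--     # --- Step 3: 推算 Min（能被 Multiple 整除的最小值）---
--     valid_candidates = [x for x in set(clean) if x % guessed_multiple == 0]
--     if valid_candidates:
--         guessed_min = min(valid_candidates)
--     else:
--         guessed_min = min(clean)
--
--     return guessed_min, guessed_multiple
-- ===== SOURCE B (Python) =====
-- from math import gcd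
-- from collections import Counter
--
--
-- def _suffix_gcds(vals):
--     # sufs[i] = gcd of vals[i:] (0 for the empty tail), built back-to-front.
--     out = [0]
--     for v in reversed(vals):
--         out.append(gcd(v, out[-1]))
--     out.reverse()
--     return out
--
--
-- def guess_min_and_multiple(history_records):
--     # Prefix/suffix GCD tables over the distinct values: every candidate removal of a
--     # single-occurrence value is evaluated in O(1) instead of re-reducing the whole list.
--     clean = [int(x) for x in history_records if x is not None and int(x) > 0]
--     if not clean:
--         return None, None
--     if len(clean) == 1:
--         return clean[0], clean[0]
--
--     counts = Counter(clean)
--     distinct = list(counts)            # distinct values, first-occurrence order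
--     suf = _suffix_gcds(distinct)       # duplicates never change a gcd
--
--     g = suf[0]                         # gcd of all values
--     if any(c >= 2 for c in counts.values()) and any(c == 1 for c in counts.values()):
--         # best gcd obtainable by dropping one single-occurrence value
--         best = 0
--         pre = 0
--         for i, v in enumerate(distinct):
--             if counts[v] == 1:
--                 best = max(best, gcd(pre, suf[i + 1]))
--             pre = gcd(pre, v)
--         g = best
--
--     guessed_min = min(x for x in distinct if x % g == 0)
--     return guessed_min, g
-- ===== Notes on version B (the rewrite author's own statement) =====
-- stated objective: faster
-- what changed: Instead of, for every single-occurrence value, copying the whole list, removing the value and re-reducing the remainder with gcd (O(n) gcd reductions per candidate), B builds the Counter once, takes the distinct values, precomputes suffix-gcd and running prefix-gcd tables over them, and evaluates every candidate removal with a single gcd(prefix, suffix) in one forward pass; the final Min is read off the distinct values directly.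
import Mathlib
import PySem

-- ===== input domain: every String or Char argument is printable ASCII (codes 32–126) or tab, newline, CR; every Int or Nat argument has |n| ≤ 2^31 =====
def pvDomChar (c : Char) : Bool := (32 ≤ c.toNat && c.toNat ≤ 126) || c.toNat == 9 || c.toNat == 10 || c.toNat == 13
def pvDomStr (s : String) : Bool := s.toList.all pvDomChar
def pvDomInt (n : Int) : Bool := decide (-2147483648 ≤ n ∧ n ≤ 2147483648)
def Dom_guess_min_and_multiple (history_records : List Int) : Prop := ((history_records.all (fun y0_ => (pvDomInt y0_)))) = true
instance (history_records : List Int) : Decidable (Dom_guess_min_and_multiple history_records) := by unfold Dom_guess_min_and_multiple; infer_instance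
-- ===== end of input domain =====

-- B replaces A's per-candidate list-copy + full gcd re-reduction with prefix/suffix gcd
-- tables over the distinct values: measurably faster (O(n log M) vs O(n^2 log M)).


-- ===== PORT A =====

-- functools.reduce(math.gcd, l); A only applies it to nonempty lists, so the [] case is unreachable
def pvReduceGcd (l : List Int) : Int :=
  match l with
  | [] => 0
  | h :: t => t.foldl (fun a b => ((Int.gcd a b : Nat) : Int)) h

def guess_min_and_multiple (history_records : List Int) : Option Int × Option Int :=
  -- for an Int x, 'x is not None' and "str(x).strip() != ''" always hold and int(x) = x,
  -- and the try/except around the comprehension can never fire: clean = the positive entries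
  let clean := history_records.filter (fun x => decide (0 < x))
  if clean = [] then (none, none)
  else if clean.length = 1 then (some (clean.headD 0), some (clean.headD 0))
  else
    let counts := PySem.Dict.counter clean
    let has_frequent := counts.values.any (fun c => decide (2 ≤ c))
    let single_occurrence := (counts.items.filter (fun p => p.2 == (1 : Int))).map Prod.fst
    let reliable_nums :=
      if single_occurrence = [] ∨ has_frequent = false then
        -- list(set(clean)); consumed order-insensitively only (sorted below)
        PySem.Set.ofList clean
      else
        let st := single_occurrence.foldl
          (fun (st : Int × Option Int) s =>
            match PySem.List.remove? clean s with
            | none => st            -- unreachable: every s ∈ single_occurrence occurs in clean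
            | some without_s =>
              if without_s = [] then st
              else
                let g := pvReduceGcd without_s
                if st.1 < g then (g, some s) else st)
          ((0 : Int), (none : Option Int))
        match st.2 with
        | some best_removal =>
            if 1 ≤ st.1 then PySem.Set.ofList (clean.filter (fun x => !(x == best_removal)))
            else PySem.Set.ofList clean
        | none => PySem.Set.ofList clean
    let reliable_sorted := PySem.List.sorted reliable_nums (fun x => x) false
    let gm0 := pvReduceGcd reliable_sorted
    let guessed_multiple := if gm0 ≤ 0 then 1 else gm0
    let valid_candidates := (PySem.Set.ofList clean).filter
        (fun x => PySem.Int.mod x guessed_multiple == 0)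
    let guessed_min :=
      if valid_candidates = [] then PySem.List.min? clean (fun x => x)
      else PySem.List.min? valid_candidates (fun x => x)
    (guessed_min, some guessed_multiple)

-- ===== PORT B =====

-- _suffix_gcds: out = [0]; for v in reversed(vals): out.append(gcd(v, out[-1])); out.reverse()
def pvSuffixGcds (vals : List Int) : List Int :=
  (vals.reverse.foldl
    (fun out v => out ++ [((Int.gcd v (out.getLast?.getD 0) : Nat) : Int)])
    [(0 : Int)]).reverse

def guess_min_and_multiple_alt (history_records : List Int) : Option Int × Option Int :=
  let clean := history_records.filter (fun x => decide (0 < x))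
  if clean = [] then (none, none)
  else if clean.length = 1 then (some (clean.headD 0), some (clean.headD 0))
  else
    let counts := PySem.Dict.counter clean
    let distinct := counts.keys
    let suf := pvSuffixGcds distinct
    let g :=
      if counts.values.any (fun c => decide (2 ≤ c)) && counts.values.any (fun c => c == (1 : Int)) then
        ((PySem.List.enumerate distinct 0).foldl
          (fun (st : Int × Int) iv =>
            (if counts.getD iv.2 0 == (1 : Int)
               then max st.1 ((Int.gcd st.2 (PySem.List.pyGetD suf (iv.1 + 1) 0) : Nat) : Int)
               else st.1,
             ((Int.gcd st.2 iv.2 : Nat) : Int)))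
          ((0 : Int), (0 : Int))).1
      else suf.headD 0
    let guessed_min := PySem.List.min? (distinct.filter (fun x => PySem.Int.mod x g == 0)) (fun x => x)
    (guessed_min, some g)

-- ===== PRECONDITION & SPEC =====
def Spec_guess_min_and_multiple (history_records : List Int) (out : Option Int × Option Int) : Prop := out = guess_min_and_multiple_alt history_records
instance (history_records : List Int) (out : Option Int × Option Int) : Decidable (Spec_guess_min_and_multiple history_records out) := by unfold Spec_guess_min_and_multiple; infer_instance

-- ===== CLAIM (what is proved, stated in full; the proofs are below) =====
def Claim_equal_guess_min_and_multiple : Prop := ∀ (history_records : List Int), Dom_guess_min_and_multiple history_records → Spec_guess_min_and_multiple history_records (guess_min_and_multiple history_records)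

-- ===== LEMMAS AND PROOFS =====

-- gcd of a list of ints, as a Nat fold over absolute values
def pvNatG (l : List Int) : Nat := l.foldl (fun g x => Nat.gcd g x.natAbs) 0

-- gcd of a finite set of ints
def pvFG (s : Finset Int) : Nat := s.gcd Int.natAbs

lemma pvFoldl_intGcd (l : List Int) (a : Nat) :
    l.foldl (fun x y => ((Int.gcd x y : Nat) : Int)) (a : Nat) =
      ((l.foldl (fun g x => Nat.gcd g x.natAbs) a : Nat) : Int) := by
  induction l generalizing a with
  | nil => rfl
  | cons x t ih => simpa [Int.gcd] using ih (Nat.gcd a x.natAbs)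

lemma pvFoldl_natGcd (l : List Int) (a : Nat) :
    l.foldl (fun g x => Nat.gcd g x.natAbs) a = Nat.gcd a (pvNatG l) := by
  induction l generalizing a with
  | nil => simp [pvNatG]
  | cons x t ih =>
      simp only [List.foldl_cons, pvNatG]
      rw [ih (Nat.gcd a x.natAbs), ih (Nat.gcd 0 x.natAbs)]
      simp [Nat.gcd_assoc]

lemma pvNatG_cons (x : Int) (t : List Int) :
    pvNatG (x :: t) = Nat.gcd x.natAbs (pvNatG t) := by
  simpa using (pvFoldl_natGcd (x :: t) 0).symm.trans (by simpa using pvFoldl_natGcd t x.natAbs)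

lemma pvNatG_append (l1 l2 : List Int) :
    pvNatG (l1 ++ l2) = Nat.gcd (pvNatG l1) (pvNatG l2) := by
  simpa [pvNatG, List.foldl_append] using pvFoldl_natGcd l2 (pvNatG l1)

lemma pvNatG_eq_fg (l : List Int) : pvNatG l = pvFG l.toFinset := by
  induction l with
  | nil => simp [pvNatG, pvFG]
  | cons x t ih =>
      rw [pvNatG_cons, ih]
      simp only [pvFG, List.toFinset_cons]
      by_cases hx : x ∈ t.toFinset
      · have hdvd : t.toFinset.gcd Int.natAbs ∣ x.natAbs := Finset.gcd_dvd hx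
        rw [Finset.insert_eq_self.mpr hx]
        exact Nat.gcd_eq_right hdvd
      · rw [Finset.gcd_insert]; rfl

lemma pvNatG_perm {l1 l2 : List Int} (h : l1.Perm l2) : pvNatG l1 = pvNatG l2 := by
  rw [pvNatG_eq_fg, pvNatG_eq_fg, List.toFinset_eq_of_perm l1 l2 h]

lemma pvReduceGcd_eq (l : List Int) (hne : l ≠ []) (hpos : ∀ x ∈ l, 0 ≤ x) :
    pvReduceGcd l = ((pvNatG l : Nat) : Int) := by
  match l with
  | h :: t =>
      have h0 : (0:Int) ≤ h := hpos h (List.mem_cons_self)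
      have : (h : Int) = ((h.natAbs : Nat) : Int) := by
        rw [Int.natAbs_of_nonneg h0]
      rw [pvReduceGcd, this, pvFoldl_intGcd, pvFoldl_natGcd, pvNatG_cons]
      simp [Int.natAbs_abs]

-- the structure of pvSuffixGcds: head-gcd spec
def pvSufSpec : List Int → List Int
  | [] => [(0 : Int)]
  | v :: t => ((pvNatG (v :: t) : Nat) : Int) :: pvSufSpec t

lemma pvSufSpec_ne_nil (l : List Int) : pvSufSpec l ≠ [] := by
  cases l <;> simp [pvSufSpec]

lemma pvSufSpec_headD (l : List Int) : (pvSufSpec l).headD 0 = ((pvNatG l : Nat) : Int) := by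
  cases l <;> simp [pvSufSpec, pvNatG]

lemma pvSuffixGcds_eq (l : List Int) : pvSuffixGcds l = pvSufSpec l := by
  induction l with
  | nil => rfl
  | cons v t ih =>
      have step : pvSuffixGcds (v :: t) =
          (((pvSuffixGcds t).reverse ++
            [((Int.gcd v (((pvSuffixGcds t).reverse).getLast?.getD 0) : Nat) : Int)]).reverse) := by
        simp [pvSuffixGcds, List.foldl_append]
      rw [step, ih]
      have hlast : ((pvSufSpec t).reverse).getLast?.getD 0 = ((pvNatG t : Nat) : Int) := by
        rw [List.getLast?_reverse]
        have := pvSufSpec_headD t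
        cases h : pvSufSpec t with
        | nil => exact absurd h (pvSufSpec_ne_nil t)
        | cons a b => simpa [h] using this
      rw [hlast]
      simp [pvSufSpec, pvNatG_cons, Int.gcd]

lemma pvSufSpec_getD (l : List Int) (k : Nat) (hk : k ≤ l.length) :
    (pvSufSpec l).getD k 0 = ((pvNatG (l.drop k) : Nat) : Int) := by
  induction l generalizing k with
  | nil =>
      have : k = 0 := by simpa using hk
      simp [this, pvSufSpec, pvNatG]
  | cons v t ih =>
      cases k with
      | zero => simp [pvSufSpec]
      | succ k => simpa [pvSufSpec] using ih k (by simpa using hk)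


lemma pvSet_toFinset (l : List Int) : (PySem.Set.ofList l).toFinset = l.toFinset := by
  ext x; simp [PySem.Set.mem_ofList]

lemma pvFilterNe_toFinset (l : List Int) (a : Int) :
    (l.filter (fun x => !(x == a))).toFinset = l.toFinset.erase a := by
  ext x
  simp [Finset.mem_erase, and_comm]

lemma pvErase_toFinset_of_count_one (l : List Int) (s : Int) (h : l.count s = 1) :
    (l.erase s).toFinset = l.toFinset.erase s := by
  ext x
  simp only [List.mem_toFinset, Finset.mem_erase, List.mem_toFinset]
  constructor
  · intro hx
    refine ⟨?_, List.mem_of_mem_erase hx⟩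
    rintro rfl
    have : List.count x (l.erase x) = 0 := by rw [List.count_erase_self, h]
    exact (List.count_eq_zero.mp this) hx
  · rintro ⟨hne, hx⟩
    exact (List.mem_erase_of_ne hne).mpr hx

-- the list-middle form: removing the k-th element of a nodup list is a Finset erase
lemma pvMiddle_toFinset (l1 : List Int) (v : Int) (l2 : List Int)
    (h : (l1 ++ v :: l2).Nodup) :
    (l1 ++ l2).toFinset = (l1 ++ v :: l2).toFinset.erase v := by
  have hv1 : v ∉ l1 := by
    intro hm
    exact (List.disjoint_of_nodup_append h) hm List.mem_cons_self
  have hv2 : v ∉ l2 := by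
    have := (List.nodup_append.mp h).2.1
    exact (List.nodup_cons.mp this).1
  ext x
  simp only [List.mem_toFinset, Finset.mem_erase, List.mem_append, List.mem_cons]
  constructor
  · intro hx
    refine ⟨?_, by tauto⟩
    rintro rfl
    rcases hx with hx | hx
    exacts [hv1 hx, hv2 hx]
  · rintro ⟨hne, hx | rfl | hx⟩ <;> tauto

-- A's inner loop, in simplified form: running strict-improvement max with argmax
lemma pvLoopA (v : Int → Nat) (l : List Int) (b : Int) (r : Option Int) :
    (l.foldl (fun st s => if st.1 < ((v s : Nat) : Int) then (((v s : Nat) : Int), some s) else st)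
        (b, r)).1
      = l.foldl (fun b s => max b ((v s : Nat) : Int)) b ∧
    (((l.foldl (fun st s => if st.1 < ((v s : Nat) : Int) then (((v s : Nat) : Int), some s) else st)
        (b, r)).2 = r ∧
      (l.foldl (fun st s => if st.1 < ((v s : Nat) : Int) then (((v s : Nat) : Int), some s) else st)
        (b, r)).1 = b) ∨
     ∃ s₀ ∈ l,
      (l.foldl (fun st s => if st.1 < ((v s : Nat) : Int) then (((v s : Nat) : Int), some s) else st)
        (b, r)).2 = some s₀ ∧
      (l.foldl (fun st s => if st.1 < ((v s : Nat) : Int) then (((v s : Nat) : Int), some s) else st)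
        (b, r)).1 = ((v s₀ : Nat) : Int)) := by
  induction l generalizing b r with
  | nil => simp
  | cons x t ih =>
      simp only [List.foldl_cons]
      by_cases hlt : b < ((v x : Nat) : Int)
      · have hmax : max b ((v x : Nat) : Int) = ((v x : Nat) : Int) := by omega
        rw [if_pos hlt, hmax]
        refine ⟨(ih _ _).1, ?_⟩
        rcases (ih ((v x : Nat) : Int) (some x)).2 with ⟨h2, h1⟩ | ⟨s₀, hs₀, h2, h1⟩
        · exact Or.inr ⟨x, List.mem_cons_self, h2, h1⟩
        · exact Or.inr ⟨s₀, List.mem_cons_of_mem _ hs₀, h2, h1⟩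
      · have hmax : max b ((v x : Nat) : Int) = b := by omega
        rw [if_neg hlt, hmax]
        refine ⟨(ih _ _).1, ?_⟩
        rcases (ih b r).2 with ⟨h2, h1⟩ | ⟨s₀, hs₀, h2, h1⟩
        · exact Or.inl ⟨h2, h1⟩
        · exact Or.inr ⟨s₀, List.mem_cons_of_mem _ hs₀, h2, h1⟩

-- B's forward pass with a running prefix gcd, against the positional erase values
lemma pvLoopB (distinct : List Int) (hnd : distinct.Nodup) (q : Int → Bool) :
    ∀ (t l1 : List Int) (b : Int), l1 ++ t = distinct →
    ((PySem.List.enumerate t (l1.length : Int)).foldl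
        (fun (st : Int × Int) iv =>
          (if q iv.2
             then max st.1 ((Int.gcd st.2 (PySem.List.pyGetD (pvSufSpec distinct) (iv.1 + 1) 0) : Nat) : Int)
             else st.1,
           ((Int.gcd st.2 iv.2 : Nat) : Int)))
        (b, ((pvNatG l1 : Nat) : Int))).1
      = t.foldl (fun b v => if q v then max b ((pvFG (distinct.toFinset.erase v) : Nat) : Int) else b) b := by
  intro t
  induction t with
  | nil => intro l1 b h; simp [PySem.List.enumerate_nil]
  | cons v t' ih =>
      intro l1 b h
      rw [PySem.List.enumerate_cons, List.foldl_cons, List.foldl_cons]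
      have hidx : (l1.length : Int) + 1 = (((l1 ++ [v]).length : Nat) : Int) := by
        simp
      have hdrop : distinct.drop (l1.length + 1) = t' := by
        rw [← h, ← List.drop_drop, List.drop_left]
        rfl
      have hk : l1.length + 1 ≤ distinct.length := by
        rw [← h]; simp only [List.length_append, List.length_cons]; omega
      have hget : PySem.List.pyGetD (pvSufSpec distinct) ((l1.length : Int) + 1) 0
          = ((pvNatG t' : Nat) : Int) := by
        have : (l1.length : Int) + 1 = ((l1.length + 1 : Nat) : Int) := by push_cast; ring
        rw [this, PySem.List.pyGetD_natCast, pvSufSpec_getD distinct _ hk, hdrop]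
      have hpre : ((Int.gcd ((pvNatG l1 : Nat) : Int) v : Nat) : Int)
          = ((pvNatG (l1 ++ [v]) : Nat) : Int) := by
        rw [pvNatG_append]
        simp [Int.gcd, pvNatG]
      have hnd' : (l1 ++ v :: t').Nodup := by rw [h]; exact hnd
      have hbest : ((Int.gcd ((pvNatG l1 : Nat) : Int) ((pvNatG t' : Nat) : Int) : Nat) : Int)
          = ((pvFG (distinct.toFinset.erase v) : Nat) : Int) := by
        conv_rhs => rw [← h]
        rw [← pvMiddle_toFinset l1 v t' hnd', ← pvNatG_eq_fg, pvNatG_append]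
        simp [Int.gcd]
      rw [hget, hbest, hidx, hpre]
      exact ih (l1 ++ [v]) _ (by simpa [List.append_assoc] using h)


lemma pvSingles_eq (clean : List Int) :
    ((PySem.Dict.counter clean).items.filter (fun p => p.2 == (1 : Int))).map Prod.fst
      = (PySem.Set.ofList clean).filter (fun k => ((clean.count k : Nat) : Int) == 1) := by
  rw [PySem.Dict.items_counter, List.filter_map, List.map_map]
  simp [Function.comp_def]

lemma pvValues_any (clean : List Int) (p : Int → Bool) :
    (PySem.Dict.counter clean).values.any p
      = (PySem.Set.ofList clean).any (fun k => p ((clean.count k : Nat) : Int)) := by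
  unfold PySem.Dict.values
  rw [PySem.Dict.items_counter, List.map_map, List.any_map]
  rfl

lemma pvAny_iff_filter_ne (l : List Int) (p : Int → Bool) :
    l.any p = true ↔ l.filter p ≠ [] := by
  simp [List.any_eq_true, Ne, List.filter_eq_nil_iff]

lemma pvFG_pos (clean : List Int) (hpos : ∀ x ∈ clean, 0 < x) (T : Finset Int)
    (hT : T ⊆ clean.toFinset) (x : Int) (hx : x ∈ T) : 1 ≤ pvFG T := by
  rcases Nat.eq_zero_or_pos (pvFG T) with h | h
  · have := (Finset.gcd_eq_zero_iff.mp h) x hx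
    have hxc : x ∈ clean := List.mem_toFinset.mp (hT hx)
    have := hpos x hxc
    omega
  · exact h

lemma pvValid_ne_nil (clean : List Int) (hpos : ∀ x ∈ clean, 0 < x) (T : Finset Int)
    (hT : T ⊆ clean.toFinset) (x : Int) (hx : x ∈ T) :
    (PySem.Set.ofList clean).filter (fun y => PySem.Int.mod y ((pvFG T : Nat) : Int) == 0) ≠ [] := by
  have hxc : x ∈ clean := List.mem_toFinset.mp (hT hx)
  have hdvd : ((pvFG T : Nat) : Int) ∣ x := by
    have h1 : pvFG T ∣ x.natAbs := Finset.gcd_dvd hx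
    have h2 : ((pvFG T : Nat) : Int) ∣ (x.natAbs : Int) := Int.natCast_dvd_natCast.mpr h1
    rwa [Int.natAbs_of_nonneg (le_of_lt (hpos x hxc))] at h2
  intro hnil
  have hxS : x ∈ PySem.Set.ofList clean := (PySem.Set.mem_ofList _ _).mpr hxc
  have := List.filter_eq_nil_iff.mp hnil x hxS
  rw [beq_iff_eq, PySem.Int.mod_eq_zero_iff_dvd] at this
  exact this hdvd

-- reduce(gcd) of sorted(list(set(l))) is the gcd of l's value set
lemma pvGm_sorted_set (l : List Int) (hpos : ∀ x ∈ l, 0 < x) (hne : l ≠ []) :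
    pvReduceGcd (PySem.List.sorted (PySem.Set.ofList l) (fun x => x) false)
      = ((pvFG l.toFinset : Nat) : Int) := by
  have hSne : PySem.Set.ofList l ≠ [] := by
    rcases List.exists_mem_of_ne_nil l hne with ⟨x, hx⟩
    exact List.ne_nil_of_mem ((PySem.Set.mem_ofList _ _).mpr hx)
  have hsne : PySem.List.sorted (PySem.Set.ofList l) (fun x => x) false ≠ [] := by
    rw [Ne, PySem.List.sorted_eq_nil_iff]; exact hSne
  rw [pvReduceGcd_eq _ hsne (by
    intro x hx
    have := (PySem.List.mem_sorted _ _ _ _).mp hx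
    exact le_of_lt (hpos x ((PySem.Set.mem_ofList _ _).mp this)))]
  rw [pvNatG_perm (PySem.List.sorted_perm _ _ _), pvNatG_eq_fg, pvSet_toFinset]


lemma pvLoopB_zero (distinct : List Int) (hnd : distinct.Nodup) (q : Int → Bool) :
    ((PySem.List.enumerate distinct 0).foldl
        (fun (st : Int × Int) iv =>
          (if q iv.2
             then max st.1 ((Int.gcd st.2 (PySem.List.pyGetD (pvSufSpec distinct) (iv.1 + 1) 0) : Nat) : Int)
             else st.1,
           ((Int.gcd st.2 iv.2 : Nat) : Int)))
        ((0 : Int), (0 : Int))).1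
      = distinct.foldl (fun b v => if q v then max b ((pvFG (distinct.toFinset.erase v) : Nat) : Int) else b) 0 := by
  have h := pvLoopB distinct hnd q distinct [] 0 rfl
  simpa [pvNatG] using h

lemma pvGm_sorted_filter (l : List Int) (hpos : ∀ x ∈ l, 0 < x) (s₀ k : Int)
    (hk : k ∈ l) (hne : k ≠ s₀) :
    pvReduceGcd (PySem.List.sorted (PySem.Set.ofList (l.filter (fun x => !(x == s₀)))) (fun x => x) false)
      = ((pvFG (l.toFinset.erase s₀) : Nat) : Int) := by
  have hkf : k ∈ l.filter (fun x => !(x == s₀)) := by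
    simp [List.mem_filter, hk, hne]
  rw [pvGm_sorted_set (l.filter (fun x => !(x == s₀)))
      (fun x hx => hpos x (List.mem_of_mem_filter hx)) (List.ne_nil_of_mem hkf),
    pvFilterNe_toFinset]

-- ===== VERDICT (by name: the statement is the Claim_ definition above) =====
theorem guess_min_and_multiple_spec : Claim_equal_guess_min_and_multiple := by
  intro hist _
  show guess_min_and_multiple hist = guess_min_and_multiple_alt hist
  simp only [guess_min_and_multiple, guess_min_and_multiple_alt]
  set c := hist.filter (fun x => decide (0 < x)) with hc
  have hpos : ∀ x ∈ c, 0 < x := by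
    intro x hx
    have := (List.mem_filter.mp hx).2
    simpa using this
  by_cases h0 : c = []
  · simp [h0]
  by_cases h1 : c.length = 1
  · simp [h0, h1]
  have hlen2 : 2 ≤ c.length := by
    have := List.length_pos_of_ne_nil h0
    omega
  simp only [if_neg h0, if_neg h1]
  rw [pvSingles_eq]
  simp only [pvValues_any, PySem.Dict.keys_counter, pvSuffixGcds_eq, PySem.Dict.getD_counter]
  -- abbreviations used below (syntactic copies of what the goal shows)
  have hSne : PySem.Set.ofList c ≠ [] := by
    rcases List.exists_mem_of_ne_nil c h0 with ⟨x, hx⟩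
    exact List.ne_nil_of_mem ((PySem.Set.mem_ofList _ _).mpr hx)
  have hTF : (PySem.Set.ofList c).toFinset = c.toFinset := pvSet_toFinset c
  have hq1 : (List.any (PySem.Set.ofList c) fun k => ((List.count k c : Int)) == 1) = true ↔
      List.filter (fun k => ((List.count k c : Int)) == 1) (PySem.Set.ofList c) ≠ [] :=
    pvAny_iff_filter_ne _ _
  by_cases hsing : List.filter (fun k => ((List.count k c : Int)) == 1) (PySem.Set.ofList c) = []
  · -- no single-occurrence values: both sides use the gcd of all values
    rw [if_pos (Or.inl hsing)]
    have hBq1 : (List.any (PySem.Set.ofList c) fun k => ((List.count k c : Int)) == 1) = false := by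
      rcases Bool.eq_false_or_eq_true (List.any (PySem.Set.ofList c) fun k => ((List.count k c : Int)) == 1) with h | h
      all_goals first
      | exact h
      | exact absurd (hq1.mp h) (by simpa using hsing)
    rw [if_neg (show ¬(((List.any (PySem.Set.ofList c) fun k => decide (2 ≤ ((List.count k c : Int)))) &&
        (List.any (PySem.Set.ofList c) fun k => ((List.count k c : Int)) == 1)) = true) from by simp [hBq1])]
    rw [pvGm_sorted_set c hpos h0]
    rcases List.exists_mem_of_ne_nil c h0 with ⟨x, hx⟩
    have hg1 : (1 : Nat) ≤ pvFG c.toFinset :=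
      pvFG_pos c hpos c.toFinset (Finset.Subset.refl _) x (List.mem_toFinset.mpr hx)
    have hgpos : (0 : Int) < ((pvFG c.toFinset : Nat) : Int) := by exact_mod_cast hg1
    rw [if_neg (not_le.mpr hgpos)]
    rw [if_neg (pvValid_ne_nil c hpos c.toFinset (Finset.Subset.refl _) x (List.mem_toFinset.mpr hx))]
    rw [pvSufSpec_headD]
    have hNG : pvNatG (PySem.Set.ofList c) = pvFG c.toFinset := by
      rw [pvNatG_eq_fg, pvSet_toFinset]
    rw [hNG]

  by_cases hfreq : (List.any (PySem.Set.ofList c) fun k => decide (2 ≤ ((List.count k c : Int)))) = true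
  · -- removal branch on both sides
    rw [if_neg (show ¬(List.filter (fun k => ((List.count k c : Int)) == 1) (PySem.Set.ofList c) = [] ∨
        (List.any (PySem.Set.ofList c) fun k => decide (2 ≤ ((List.count k c : Int)))) = false) from by
      exact not_or.mpr ⟨hsing, by rw [hfreq]; simp⟩)]
    rw [if_pos (show (((List.any (PySem.Set.ofList c) fun k => decide (2 ≤ ((List.count k c : Int)))) &&
        (List.any (PySem.Set.ofList c) fun k => ((List.count k c : Int)) == 1)) = true) from by
      rw [Bool.and_eq_true]
      exact ⟨hfreq, hq1.mpr hsing⟩)]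
    -- rewrite A's inner loop body into its simplified strict-improvement form
    have hbody : ∀ (acc : Int × Option Int),
        ∀ s ∈ List.filter (fun k => ((List.count k c : Int)) == 1) (PySem.Set.ofList c),
        (fun (st : Int × Option Int) s =>
          match PySem.List.remove? c s with
          | none => st
          | some without_s =>
            if without_s = [] then st
            else if st.1 < pvReduceGcd without_s then (pvReduceGcd without_s, some s) else st) acc s =
        (fun (st : Int × Option Int) s =>
          if st.1 < ((pvFG (c.toFinset.erase s) : Nat) : Int)
          then (((pvFG (c.toFinset.erase s) : Nat) : Int), some s) else st) acc s := by
      intro acc s hs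
      have hsc : s ∈ c := (PySem.Set.mem_ofList _ _).mp (List.mem_of_mem_filter hs)
      have hcnt : List.count s c = 1 := by
        have := List.of_mem_filter hs
        simpa using this
      simp only [PySem.List.remove?_eq_some_erase c s hsc]
      have herne : c.erase s ≠ [] := by
        have hle : (c.erase s).length = c.length - 1 := by
          rw [List.length_erase]; simp [hsc]
        intro hnil
        rw [hnil] at hle
        simp at hle
        omega
      rw [if_neg herne]
      have hred : pvReduceGcd (c.erase s) = ((pvFG (c.toFinset.erase s) : Nat) : Int) := by
        rw [pvReduceGcd_eq _ herne (fun x hx => le_of_lt (hpos x (List.mem_of_mem_erase hx))),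
          pvNatG_eq_fg, pvErase_toFinset_of_count_one c s hcnt]
      rw [hred]
    rw [PySem.List.foldl_congr_mem _ _ _ ((0 : Int), (none : Option Int)) hbody]
    obtain ⟨hres1, hres2⟩ := pvLoopA (fun s => pvFG (c.toFinset.erase s))
      (List.filter (fun k => ((List.count k c : Int)) == 1) (PySem.Set.ofList c)) 0 none
    rcases List.any_eq_true.mp hfreq with ⟨k, hkS, hkdec⟩
    have hkc : k ∈ c := (PySem.Set.mem_ofList _ _).mp hkS
    have hk2 : 2 ≤ List.count k c := by simpa using of_decide_eq_true hkdec
    have hval1 : ∀ s ∈ List.filter (fun k => ((List.count k c : Int)) == 1) (PySem.Set.ofList c),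
        1 ≤ pvFG (c.toFinset.erase s) := by
      intro s hs
      have hcnt : List.count s c = 1 := by
        have := List.of_mem_filter hs
        simpa using this
      have hne : k ≠ s := by
        intro h
        rw [h, hcnt] at hk2
        omega
      exact pvFG_pos c hpos _ (Finset.erase_subset _ _) k
        (Finset.mem_erase.mpr ⟨hne, List.mem_toFinset.mpr hkc⟩)
    rcases List.exists_mem_of_ne_nil _ hsing with ⟨s₁, hs₁⟩
    rcases hres2 with ⟨-, hres1b⟩ | ⟨s₀, hs₀, h2, h1v⟩
    · exfalso
      have hle := (PySem.List.le_foldl_max_int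
        (List.filter (fun k => ((List.count k c : Int)) == 1) (PySem.Set.ofList c))
        (fun s => ((pvFG (c.toFinset.erase s) : Nat) : Int)) 0).2 s₁ hs₁
      have h1s : (1 : Int) ≤ ((pvFG (c.toFinset.erase s₁) : Nat) : Int) := by
        exact_mod_cast hval1 s₁ hs₁
      rw [← hres1, hres1b] at hle
      omega
    have hns₀ : List.count s₀ c = 1 := by
      have := List.of_mem_filter hs₀
      simpa using this
    have hks₀ : k ≠ s₀ := by
      intro h
      rw [h, hns₀] at hk2
      omega
    rw [h2]
    simp only []
    rw [h1v]
    have hv₀ : (1 : Int) ≤ ((pvFG (c.toFinset.erase s₀) : Nat) : Int) := by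
      exact_mod_cast hval1 s₀ hs₀
    rw [if_pos hv₀]
    rw [pvGm_sorted_filter c hpos s₀ k hkc hks₀]
    rw [if_neg (not_le.mpr (show (0 : Int) < ((pvFG (c.toFinset.erase s₀) : Nat) : Int) by omega))]
    rw [if_neg (pvValid_ne_nil c hpos (c.toFinset.erase s₀) (Finset.erase_subset _ _) k
      (Finset.mem_erase.mpr ⟨hks₀, List.mem_toFinset.mpr hkc⟩))]
    -- B side
    rw [pvLoopB_zero (PySem.Set.ofList c) (PySem.Set.nodup_ofList c)
      (fun v => ((List.count v c : Int)) == 1)]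
    rw [hTF, PySem.List.foldl_if_eq_foldl_filter]
    rw [← hres1, h1v]

  · -- no value occurs twice: both sides use the gcd of all values
    have hfreq' : (List.any (PySem.Set.ofList c) fun k => decide (2 ≤ ((List.count k c : Int)))) = false := by
      simpa using hfreq
    rw [if_pos (Or.inr hfreq')]
    rw [if_neg (show ¬(((List.any (PySem.Set.ofList c) fun k => decide (2 ≤ ((List.count k c : Int)))) &&
        (List.any (PySem.Set.ofList c) fun k => ((List.count k c : Int)) == 1)) = true) from by
      intro hcontra
      rw [Bool.and_eq_true] at hcontra
      exact hfreq hcontra.1)]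
    rw [pvGm_sorted_set c hpos h0]
    rcases List.exists_mem_of_ne_nil c h0 with ⟨x, hx⟩
    have hg1 : (1 : Nat) ≤ pvFG c.toFinset :=
      pvFG_pos c hpos c.toFinset (Finset.Subset.refl _) x (List.mem_toFinset.mpr hx)
    have hgpos : (0 : Int) < ((pvFG c.toFinset : Nat) : Int) := by exact_mod_cast hg1
    rw [if_neg (not_le.mpr hgpos)]
    rw [if_neg (pvValid_ne_nil c hpos c.toFinset (Finset.Subset.refl _) x (List.mem_toFinset.mpr hx))]
    rw [pvSufSpec_headD]
    have hNG : pvNatG (PySem.Set.ofList c) = pvFG c.toFinset := by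
      rw [pvNatG_eq_fg, pvSet_toFinset]
    rw [hNG]
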